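-- pv_equiv track=rewrite | github.com/Sa-Va-Ba/odoo-erp-agent | src/signals.py | _check_future
-- ===== SOURCE A (Python) =====
-- FUTURE_WORDS = {
--     "plan to", "planning to", "want to", "going to", "will",
--     "hope to", "looking to", "considering", "thinking about",
--     "next year", "in the future", "eventually", "soon",
--     "might", "maybe", "potentially", "explore",
-- }
--
-- def _check_future(text_lower: str, match_start: int) -> bool:
--     """Check if there's a future/planning indicator near the match."""
--     # Check a window around the match (before and after)
--     window_start = max(0, match_start - 60)
--     window_end = min(len(text_lower), match_start + 60)
--     window = text_lower[window_start:window_end]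
--
--     for fut in FUTURE_WORDS:
--         if fut in window:
--             return True
--     return False
-- ===== SOURCE B (Python) =====
-- FUTURE_WORDS = {
--     "plan to", "planning to", "want to", "going to", "will",
--     "hope to", "looking to", "considering", "thinking about",
--     "next year", "in the future", "eventually", "soon",
--     "might", "maybe", "potentially", "explore",
-- }
--
-- def _check_future(text_lower: str, match_start: int) -> bool:
--     """Single left-to-right scan: at each position of the window, try every
--     phrase whose first character matches (naive multi-pattern matching),
--     instead of one substring search per phrase."""
--     window_start = max(0, match_start - 60)
--     window_end = min(len(text_lower), match_start + 60)
--     window = text_lower[window_start:window_end]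
--
--     for i, ch in enumerate(window):
--         for w in FUTURE_WORDS:
--             if w[0] == ch and window.startswith(w, i):
--                 return True
--     return False
-- ===== Notes on version B (the rewrite author's own statement) =====
-- stated objective: alternative
-- what changed: Replaces the per-phrase substring search (one full scan of the window for each of the 17 phrases) with a single position-major left-to-right scan of the window that tries all phrases at each position, dispatching on the first character.
import Mathlib
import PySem

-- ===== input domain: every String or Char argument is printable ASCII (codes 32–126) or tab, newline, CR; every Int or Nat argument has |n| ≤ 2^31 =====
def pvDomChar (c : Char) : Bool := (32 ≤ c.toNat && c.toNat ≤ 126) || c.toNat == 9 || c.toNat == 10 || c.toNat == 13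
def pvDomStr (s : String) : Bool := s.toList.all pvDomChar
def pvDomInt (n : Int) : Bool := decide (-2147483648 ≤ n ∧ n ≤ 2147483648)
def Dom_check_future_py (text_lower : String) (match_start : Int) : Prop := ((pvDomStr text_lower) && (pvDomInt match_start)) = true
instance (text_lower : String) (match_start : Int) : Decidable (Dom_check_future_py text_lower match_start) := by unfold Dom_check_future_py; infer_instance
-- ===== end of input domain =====

-- B replaces the per-phrase substring search with a single position-major scan
-- of the window that tries all phrases at each position (alternative algorithm, same cost).


-- the module-level constant FUTURE_WORDS, read by both A and B
def futureWords : List (List Char) :=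
  ["plan to".toList, "planning to".toList, "want to".toList, "going to".toList, "will".toList,
   "hope to".toList, "looking to".toList, "considering".toList, "thinking about".toList,
   "next year".toList, "in the future".toList, "eventually".toList, "soon".toList,
   "might".toList, "maybe".toList, "potentially".toList, "explore".toList]

-- ===== PORT A =====
def check_future_py (text_lower : String) (match_start : Int) : Bool :=
  let tl := text_lower.toList
  let window_start : Int := max 0 (match_start - 60)
  let window_end : Int := min (tl.length : Int) (match_start + 60)
  let window := PySem.List.slice tl (some window_start) (some window_end)
  -- for fut in FUTURE_WORDS: if fut in window: return True / return False
  futureWords.any (fun fut => PySem.Chars.isIn fut window)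

-- ===== PORT B =====
-- inner loop of B: at position i (window = dropped prefix already consumed),
-- try each phrase whose first character matches, via startswith
def scanWindow (window : List Char) : Bool :=
  match window with
  | [] => false
  | c :: rest =>
      (futureWords.any (fun w => (w.head? == some c) && PySem.Chars.startswith (c :: rest) w))
      || scanWindow rest

def check_future_py_alt (text_lower : String) (match_start : Int) : Bool :=
  let tl := text_lower.toList
  let window_start : Int := max 0 (match_start - 60)
  let window_end : Int := min (tl.length : Int) (match_start + 60)
  let window := PySem.List.slice tl (some window_start) (some window_end)
  scanWindow window

-- ===== PRECONDITION & SPEC =====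
def Spec_check_future_py (text_lower : String) (match_start : Int) (out : Bool) : Prop := out = check_future_py_alt text_lower match_start
instance (text_lower : String) (match_start : Int) (out : Bool) : Decidable (Spec_check_future_py text_lower match_start out) := by unfold Spec_check_future_py; infer_instance

-- ===== CLAIM (what is proved, stated in full; the proofs are below) =====
def Claim_equal_check_future_py : Prop := ∀ (text_lower : String) (match_start : Int), Dom_check_future_py text_lower match_start → Spec_check_future_py text_lower match_start (check_future_py text_lower match_start)

-- ===== LEMMAS AND PROOFS =====

lemma futureWords_ne_nil : ∀ w ∈ futureWords, w ≠ [] := by decide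

-- the word-major any-of-substring test equals the position-major scan,
-- for any list of nonempty phrases
lemma any_isIn_eq_scan (s : List Char) :
    futureWords.any (fun w => PySem.Chars.isIn w s) = scanWindow s := by
  induction s with
  | nil =>
      simp only [scanWindow, List.any_eq_false]
      intro w hw
      simp only [PySem.Chars.isIn_iff_infix, List.infix_nil]
      exact futureWords_ne_nil w hw
  | cons c rest ih =>
      rw [scanWindow, ← ih, Bool.eq_iff_iff]
      simp only [Bool.or_eq_true, List.any_eq_true, PySem.Chars.isIn_iff_infix,
        Bool.and_eq_true, beq_iff_eq, PySem.Chars.startswith_iff]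
      constructor
      · rintro ⟨w, hw, hinf⟩
        rcases List.infix_cons_iff.mp hinf with hpre | hinf'
        · left
          refine ⟨w, hw, ?_, hpre⟩
          cases w with
          | nil => exact absurd rfl (futureWords_ne_nil [] hw)
          | cons a w' =>
              obtain ⟨rfl, -⟩ := List.cons_prefix_cons.mp hpre
              rfl
        · exact Or.inr ⟨w, hw, hinf'⟩
      · rintro (⟨w, hw, -, hpre⟩ | ⟨w, hw, hinf⟩)
        · exact ⟨w, hw, List.infix_cons_iff.mpr (Or.inl hpre)⟩
        · exact ⟨w, hw, List.infix_cons_iff.mpr (Or.inr hinf)⟩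

-- ===== VERDICT (by name: the statement is the Claim_ definition above) =====
theorem check_future_py_spec : Claim_equal_check_future_py := by
  intro text_lower match_start _
  unfold Spec_check_future_py check_future_py check_future_py_alt
  exact any_isIn_eq_scan _
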